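-- pv_equiv track=rewrite | github.com/alexbelan1999/orlab5 | func.py | getT0
-- ===== SOURCE A (Python) =====
-- def getT0(plan, vertex):
--     T0 = []
--     T0.append(0)
--
--     event = 1
--     E = []
--
--     while len(T0) != vertex:
--         for i in range(0, len(plan)):
--             if plan[i][1] == event:
--                 E.append(T0[plan[i][0]] + plan[i][2])
--
--         maxnum = 0
--         for i in range(0, len(E)):
--             if maxnum < E[i]:
--                 maxnum = E[i]
--
--         T0.append(maxnum)
--         event += 1
--         E.clear()
--
--     return T0
-- ===== SOURCE B (Python) =====
-- def getT0(plan, vertex):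
--     by_event = {}
--     for row in plan:
--         by_event.setdefault(row[1], []).append(row)
--     T0 = [0]
--     for event in range(1, vertex):
--         best = 0
--         for row in by_event.get(event, []):
--             v = T0[row[0]] + row[2]
--             if v > best:
--                 best = v
--         T0.append(best)
--     return T0
-- ===== Notes on version B (the rewrite author's own statement) =====
-- stated objective: faster
-- what changed: B groups the edges by target event in a dict in one pass and then takes the max over each event's own group, instead of A's rescan of the whole plan for every event.
-- outside the precondition, e.g. on getT0([[5]], 1): A returns [0], B raises IndexError
import Mathlib
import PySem

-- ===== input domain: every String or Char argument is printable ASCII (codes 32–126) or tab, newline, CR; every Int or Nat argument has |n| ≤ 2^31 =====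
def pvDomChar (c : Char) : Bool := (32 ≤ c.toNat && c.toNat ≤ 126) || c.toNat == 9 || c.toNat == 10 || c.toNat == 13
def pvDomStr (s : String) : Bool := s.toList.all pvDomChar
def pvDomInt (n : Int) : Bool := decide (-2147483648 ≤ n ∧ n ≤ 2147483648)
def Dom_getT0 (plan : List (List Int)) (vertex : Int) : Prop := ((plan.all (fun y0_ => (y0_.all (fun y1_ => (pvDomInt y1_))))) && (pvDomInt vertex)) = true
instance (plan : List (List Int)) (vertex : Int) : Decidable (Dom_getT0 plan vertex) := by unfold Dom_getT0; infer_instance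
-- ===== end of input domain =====

-- B replaces A's per-event rescan of the whole plan by a one-pass grouping of the rows
-- by their target event (a dict), then a max over each event's own group (objective: faster).

-- ===== PORT A =====
-- while-loop as fuel recursion: under Pre_ (1 ≤ vertex) the loop runs exactly (vertex-1).toNat
-- times (len(T0) grows from 1 by one per iteration until it equals vertex).
-- 'for i in range(0, len(plan))' reads only plan[i] / E[i], so it is folded over the list itself.
-- pyGetD 0 is exact under Pre_ (every index taken is in range there).
def getT0_go (plan : List (List Int)) : Nat → List Int → Int → List Int
  | 0, T0, _ => T0
  | n + 1, T0, event =>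
      let E := plan.foldl (fun E row =>
        if PySem.List.pyGetD row 1 0 == event then
          E ++ [PySem.List.pyGetD T0 (PySem.List.pyGetD row 0 0) 0 + PySem.List.pyGetD row 2 0]
        else E) []
      let maxnum := E.foldl (fun m x => if m < x then x else m) 0
      getT0_go plan n (T0 ++ [maxnum]) (event + 1)

def getT0 (plan : List (List Int)) (vertex : Int) : List Int :=
  getT0_go plan (vertex - 1).toNat [0] 1

-- ===== PORT B =====
-- by_event.setdefault(row[1], []).append(row)  =  modify (row[1]) [] (· ++ [row])
def getT0_alt (plan : List (List Int)) (vertex : Int) : List Int :=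
  let byEvent : PySem.Dict Int (List (List Int)) :=
    plan.foldl (fun d row => d.modify (PySem.List.pyGetD row 1 0) [] (· ++ [row])) PySem.Dict.empty
  (PySem.List.pyRange 1 vertex 1).foldl (fun T0 event =>
    let best := (byEvent.getD event []).foldl (fun b row =>
      let v := PySem.List.pyGetD T0 (PySem.List.pyGetD row 0 0) 0 + PySem.List.pyGetD row 2 0
      if v > b then v else b) 0
    T0 ++ [best]) [0]

-- ===== PRECONDITION & SPEC =====
-- Pre_ excludes the inputs where the Python A does not return — vertex ≤ 0 (the while loop
-- never terminates) and, for vertex ≥ 2, rows that raise IndexError (shorter than 2; or, for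
-- a row whose target row[1] is an event actually processed, shorter than 3 or with source
-- index row[0] outside Python's index range of T0, whose length is then row[1]) — and, in
-- addition, vertex = 1 inputs containing a row shorter than 2: there A returns [0] without
-- ever reading the plan, while B's grouping pass raises IndexError on the malformed row.
def Pre_getT0 (plan : List (List Int)) (vertex : Int) : Prop :=
  1 ≤ vertex ∧ (∀ row ∈ plan, 2 ≤ row.length ∧
    ((1 ≤ PySem.List.pyGetD row 1 0 ∧ PySem.List.pyGetD row 1 0 < vertex) →
      (3 ≤ row.length ∧ -(PySem.List.pyGetD row 1 0) ≤ PySem.List.pyGetD row 0 0 ∧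
        PySem.List.pyGetD row 0 0 < PySem.List.pyGetD row 1 0)))
instance (plan : List (List Int)) (vertex : Int) : Decidable (Pre_getT0 plan vertex) := by
  unfold Pre_getT0; infer_instance

def pvWitness_getT0 : List (List Int) × Int := ([[0, 1, 3], [0, 1, 2], [1, 2, 4]], 3)

def Spec_getT0 (plan : List (List Int)) (vertex : Int) (out : List Int) : Prop := out = getT0_alt plan vertex
instance (plan : List (List Int)) (vertex : Int) (out : List Int) : Decidable (Spec_getT0 plan vertex out) := by unfold Spec_getT0; infer_instance

-- ===== CLAIM (what is proved, stated in full; the proofs are below) =====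
def Claim_equal_getT0 : Prop := ∀ (plan : List (List Int)) (vertex : Int), Dom_getT0 plan vertex → Pre_getT0 plan vertex → Spec_getT0 plan vertex (getT0 plan vertex)

-- ===== LEMMAS AND PROOFS =====

-- the grouping dict looked up at event e is exactly A's filter of the plan by target e
theorem byEvent_getD (plan : List (List Int)) (e : Int) :
    ((plan.foldl (fun d row => d.modify (PySem.List.pyGetD row 1 0) [] (· ++ [row]))
        PySem.Dict.empty).getD e [])
      = plan.filter (fun row => PySem.List.pyGetD row 1 0 == e) := by
  have h := PySem.Dict.getD_foldl_modify_append
      (l := plan.map (fun row => (PySem.List.pyGetD row 1 0, row)))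
      (d := (PySem.Dict.empty : PySem.Dict Int (List (List Int)))) (c := e)
  simpa [List.foldl_map, List.filter_map, Function.comp_def] using h

-- one step of B's fold equals one step of A's loop body
theorem step_eq (plan : List (List Int)) (T0 : List Int) (event : Int) :
    (T0 ++ [((plan.foldl (fun d row => d.modify (PySem.List.pyGetD row 1 0) [] (· ++ [row]))
        PySem.Dict.empty).getD event []).foldl (fun b row =>
        let v := PySem.List.pyGetD T0 (PySem.List.pyGetD row 0 0) 0 + PySem.List.pyGetD row 2 0
        if v > b then v else b) 0])
    = T0 ++ [(plan.foldl (fun E row =>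
        if PySem.List.pyGetD row 1 0 == event then
          E ++ [PySem.List.pyGetD T0 (PySem.List.pyGetD row 0 0) 0 + PySem.List.pyGetD row 2 0]
        else E) []).foldl (fun m x => if m < x then x else m) 0] := by
  rw [byEvent_getD,
      PySem.List.foldl_append_if (p := fun row => PySem.List.pyGetD row 1 0 == event)
        (f := fun row => PySem.List.pyGetD T0 (PySem.List.pyGetD row 0 0) 0 + PySem.List.pyGetD row 2 0),
      List.nil_append, List.foldl_map]

-- A's fuel loop from (T0, event) is B's fold over range(event, event+n)
theorem go_eq_foldl (plan : List (List Int)) :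
    ∀ (n : Nat) (T0 : List Int) (event : Int),
    getT0_go plan n T0 event
      = (PySem.List.pyRange event (event + n) 1).foldl (fun T0 event =>
          T0 ++ [((plan.foldl (fun d row => d.modify (PySem.List.pyGetD row 1 0) [] (· ++ [row]))
              PySem.Dict.empty).getD event []).foldl (fun b row =>
            let v := PySem.List.pyGetD T0 (PySem.List.pyGetD row 0 0) 0 + PySem.List.pyGetD row 2 0
            if v > b then v else b) 0]) T0 := by
  intro n
  induction n with
  | zero =>
      intro T0 event
      rw [PySem.List.pyRange_one_eq_nil (by omega)]
      rfl
  | succ n ih =>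
      intro T0 event
      rw [PySem.List.pyRange_one_cons (by push_cast; omega), List.foldl_cons]
      show getT0_go plan n _ (event + 1) = _
      have hb : event + ((n + 1 : Nat) : Int) = (event + 1) + (n : Nat) := by push_cast; ring
      rw [ih, hb, step_eq]

-- ===== VERDICT (by name: the statement is the Claim_ definition above) =====
theorem getT0_spec : Claim_equal_getT0 := by
  intro plan vertex _ hpre
  obtain ⟨h1, -⟩ := hpre
  unfold Spec_getT0 getT0 getT0_alt
  rw [go_eq_foldl]
  have hv : (1 : Int) + ((vertex - 1).toNat : Int) = vertex := by omega
  rw [hv]
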